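-- pv_equiv track=rewrite | github.com/mosharafhossain/negation-and-nlu | cue-detector/preprocessing.py | get_cue_positions
-- ===== SOURCE A (Python) =====
-- def get_cue_positions(seq):
--     """
--     Get the positions where the tokens of a all cues of a sentence are located.
--     An example for a sentence: [[2,5], [10]] means, first cue is located in the index 2 and 5, and, the second cue is located at position 10.
--     If there is no cue in a sentence then cue_positions = [].
--     :param seq: tokenized sequence for cue of a sentence. Each token can be either B_C or I_C or O_C or PAD.
--     """
--     positions = []
--     cur_pos = []
--     size = len(seq)
--     for i in range(size):
--         if seq[i] == "B_C" or i == size-1: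
--             if cur_pos:
--                 positions.append(cur_pos)
--             cur_pos = [i]
--         elif seq[i] == "I_C":
--             cur_pos.append(i)
--     return positions
-- ===== SOURCE B (Python) =====
-- def get_cue_positions(seq):
--     n = len(seq)
--     boundaries = [i for i in range(n) if seq[i] == "B_C" or i == n - 1]
--     positions = []
--     prev = None
--     start = 0
--     for b in boundaries:
--         group = ([] if prev is None else [prev]) + [j for j in range(start, b) if seq[j] == "I_C"]
--         if group:
--             positions.append(group)
--         prev = b
--         start = b + 1
--     return positions
-- ===== Notes on version B (the rewrite author's own statement) =====
-- stated objective: alternative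
-- what changed: Replaces A's incremental cur_pos state machine with a two-phase decomposition: first build the list of boundary indices (B_C tokens plus the last index), then emit each group by scanning the segment between consecutive boundaries for I_C indices with a running prev seed.
import Mathlib
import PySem

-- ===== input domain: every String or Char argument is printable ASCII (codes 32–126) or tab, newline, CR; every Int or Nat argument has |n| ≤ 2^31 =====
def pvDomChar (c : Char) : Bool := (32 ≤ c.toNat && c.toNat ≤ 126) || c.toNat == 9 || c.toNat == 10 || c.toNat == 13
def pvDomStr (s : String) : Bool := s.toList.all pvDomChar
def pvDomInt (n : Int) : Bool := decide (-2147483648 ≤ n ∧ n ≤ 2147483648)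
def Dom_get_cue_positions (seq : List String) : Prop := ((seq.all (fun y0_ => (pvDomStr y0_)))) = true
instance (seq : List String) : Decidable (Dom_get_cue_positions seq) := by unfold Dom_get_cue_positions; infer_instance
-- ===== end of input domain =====

-- B replaces A's incremental cur_pos state machine by a boundary-index table with per-segment
-- scans between consecutive boundaries (objective: alternative decomposition, same cost).

-- ===== PORT A =====
-- loop body of A's 'for i in range(size)' (state = (positions, cur_pos))
def aStep (seq : List String) (size : Int) (st : List (List Int) × List Int) (i : Int) :
    List (List Int) × List Int :=
  if PySem.List.pyGetD seq i "" == "B_C" || i == size - 1 then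
    (if st.2 = [] then st.1 else st.1 ++ [st.2], [i])
  else if PySem.List.pyGetD seq i "" == "I_C" then
    (st.1, st.2 ++ [i])
  else st

def get_cue_positions (seq : List String) : List (List Int) :=
  let size : Int := (seq.length : Int)
  ((PySem.List.pyRange 0 size 1).foldl (aStep seq size) ([], [])).1

-- ===== PORT B =====
-- boundary condition: seq[i] == "B_C" or i == n-1
def bCond (seq : List String) (n : Int) (i : Int) : Bool :=
  PySem.List.pyGetD seq i "" == "B_C" || i == n - 1

-- group = ([] if prev is None else [prev]) + [j for j in range(start, b) if seq[j] == "I_C"]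
def bGroup (seq : List String) (prev : Option Int) (start b : Int) : List Int :=
  (match prev with | none => [] | some p => [p]) ++
    (PySem.List.pyRange start b 1).filter (fun j => PySem.List.pyGetD seq j "" == "I_C")

-- loop body of B's 'for b in boundaries' (state = (positions, prev, start))
def bStep (seq : List String) (st : List (List Int) × Option Int × Int) (b : Int) :
    List (List Int) × Option Int × Int :=
  let group := bGroup seq st.2.1 st.2.2 b
  (if group = [] then st.1 else st.1 ++ [group], some b, b + 1)

def get_cue_positions_alt (seq : List String) : List (List Int) :=
  let n : Int := (seq.length : Int)
  let boundaries := (PySem.List.pyRange 0 n 1).filter (fun i => bCond seq n i)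
  (boundaries.foldl (bStep seq) ([], none, 0)).1

-- ===== PRECONDITION & SPEC =====
def Spec_get_cue_positions (seq : List String) (out : List (List Int)) : Prop := out = get_cue_positions_alt seq
instance (seq : List String) (out : List (List Int)) : Decidable (Spec_get_cue_positions seq out) := by unfold Spec_get_cue_positions; infer_instance

-- ===== CLAIM (what is proved, stated in full; the proofs are below) =====
def Claim_equal_get_cue_positions : Prop := ∀ (seq : List String), Dom_get_cue_positions seq → Spec_get_cue_positions seq (get_cue_positions seq)

-- ===== LEMMAS AND PROOFS =====

-- simulation invariant: A's fold from (pos, bGroup prev start i) over the remaining indices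
-- equals B's fold from (pos, prev, start) over the remaining boundaries
lemma gcp_sim (seq : List String) (n : Int) :
    ∀ (fuel : Nat) (i : Int), 0 ≤ i → i ≤ n → (n - i).toNat = fuel →
    ∀ (pos : List (List Int)) (prev : Option Int) (start : Int), start ≤ i →
    ((PySem.List.pyRange i n 1).foldl (aStep seq n)
        (pos, bGroup seq prev start i)).1
    = (((PySem.List.pyRange i n 1).filter (fun j => bCond seq n j)).foldl (bStep seq)
        (pos, prev, start)).1 := by
  intro fuel
  induction fuel with
  | zero =>
      intro i h0 hn hf pos prev start hs
      have hni : n ≤ i := by omega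
      rw [PySem.List.pyRange_one_eq_nil hni]
      simp
  | succ f ih =>
      intro i h0 hn hf pos prev start hs
      have hlt : i < n := by omega
      rw [PySem.List.pyRange_one_cons hlt]
      simp only [List.foldl_cons, List.filter_cons]
      by_cases hc : bCond seq n i = true
      · -- boundary: flush, seed new group with [i]
        have hstep : aStep seq n (pos, bGroup seq prev start i) i =
            ((if bGroup seq prev start i = [] then pos else pos ++ [bGroup seq prev start i]), [i]) := by
          unfold aStep
          unfold bCond at hc
          simp [hc]
        have hbstep : bStep seq (pos, prev, start) i =
            ((if bGroup seq prev start i = [] then pos else pos ++ [bGroup seq prev start i]), some i, i + 1) := by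
          unfold bStep; rfl
        simp only [hc, if_true, List.foldl_cons]
        rw [hstep, hbstep]
        have hgi : ([i] : List Int) = bGroup seq (some i) (i + 1) (i + 1) := by
          unfold bGroup
          rw [PySem.List.pyRange_one_eq_nil (le_refl (i + 1))]
          simp
        rw [hgi]
        exact ih (i + 1) (by omega) (by omega) (by omega) _ (some i) (i + 1) (le_refl _)
      · -- not a boundary
        have hcne : bCond seq n i = false := by simpa using hc
        simp only [hcne, Bool.false_eq_true, if_false]
        by_cases hI : (PySem.List.pyGetD seq i "" == "I_C") = true
        · have hstep : aStep seq n (pos, bGroup seq prev start i) i =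
              (pos, bGroup seq prev start i ++ [i]) := by
            unfold aStep
            unfold bCond at hcne
            simp [hcne, hI]
          rw [hstep]
          have hgi : bGroup seq prev start i ++ [i] = bGroup seq prev start (i + 1) := by
            unfold bGroup
            rw [PySem.List.pyRange_one_succ_right hs]
            simp [List.filter_append, hI]
          rw [hgi]
          exact ih (i + 1) (by omega) (by omega) (by omega) pos prev start (by omega)
        · have hIne : (PySem.List.pyGetD seq i "" == "I_C") = false := by simpa using hI
          have hstep : aStep seq n (pos, bGroup seq prev start i) i =
              (pos, bGroup seq prev start i) := by
            unfold aStep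
            unfold bCond at hcne
            simp [hcne, hIne]
          rw [hstep]
          have hgi : bGroup seq prev start i = bGroup seq prev start (i + 1) := by
            unfold bGroup
            rw [PySem.List.pyRange_one_succ_right hs]
            simp [List.filter_append, hIne]
          rw [hgi]
          exact ih (i + 1) (by omega) (by omega) (by omega) pos prev start (by omega)

-- ===== VERDICT (by name: the statement is the Claim_ definition above) =====
theorem get_cue_positions_spec : Claim_equal_get_cue_positions := by
  intro seq _
  unfold Spec_get_cue_positions get_cue_positions get_cue_positions_alt
  have h0 : ([] : List Int) = bGroup seq none 0 0 := by
    unfold bGroup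
    rw [PySem.List.pyRange_one_eq_nil (le_refl 0)]
    simp
  rw [h0]
  exact gcp_sim seq (seq.length : Int) (seq.length) 0 (le_refl 0) (by positivity)
    (by omega) [] none 0 (le_refl 0)
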